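-- pv_equiv track=rewrite | github.com/hieutran106/leetcode-ht | leetcode-python/hard/_42_trapping_rain_water/solution.py | max_from_side
-- ===== SOURCE A (Python) =====
-- from typing import List
--
-- def max_from_side(height: List[int], side = 'left'):
--     n = len(height)
--     max_array = [0 for _ in range(n)]
--     curr_max = 0
--     # default, scan from left -> right to find max from the left
--     enumerable = enumerate(height)
--     if side == 'right':
--         enumerable = reversed(list(enumerable))
--     for i, val in enumerable:
--         max_array[i] = curr_max
--         if height[i] > curr_max:
--             curr_max = height[i]
--     return max_array
-- ===== SOURCE B (Python) =====
-- from typing import List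
--
-- def max_from_side(height: List[int], side='left'):
--     n = len(height)
--     if side == 'right':
--         return [max([0, *height[i + 1:]]) for i in range(n)]
--     return [max([0, *height[:i]]) for i in range(n)]
-- ===== Notes on version B (the rewrite author's own statement) =====
-- stated objective: idiomatic
-- what changed: Replaces the single accumulator scan over a (possibly reversed) enumerate with two direct list comprehensions that compute each element as max over the prefix height[:i] or suffix height[i+1:], maintaining no state across iterations.
import Mathlib
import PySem

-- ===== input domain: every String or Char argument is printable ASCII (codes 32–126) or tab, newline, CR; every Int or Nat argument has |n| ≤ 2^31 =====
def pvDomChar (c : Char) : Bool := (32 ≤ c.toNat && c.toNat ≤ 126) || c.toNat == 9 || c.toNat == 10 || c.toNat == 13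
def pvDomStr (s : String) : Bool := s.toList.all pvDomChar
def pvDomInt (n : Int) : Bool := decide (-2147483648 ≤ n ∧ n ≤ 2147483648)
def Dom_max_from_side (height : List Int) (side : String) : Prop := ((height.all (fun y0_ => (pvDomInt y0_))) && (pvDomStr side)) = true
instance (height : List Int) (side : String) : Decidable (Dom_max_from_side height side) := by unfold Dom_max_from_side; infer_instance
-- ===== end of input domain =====

-- B replaces A's stateful accumulator scan with per-index prefix/suffix maxima (more idiomatic, no state; quadratic instead of linear).

-- ===== PORT A =====
def max_from_side (height : List Int) (side : String) : List Int :=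
  let n := height.length
  let max_array : List Int := (PySem.List.pyRange 0 n 1).map (fun _ => (0 : Int))
  let enumerable := PySem.List.enumerate height 0
  let enumerable := if side == "right" then enumerable.reverse else enumerable
  (enumerable.foldl
    (fun (st : List Int × Int) (iv : Int × Int) =>
      let ma := PySem.List.pySetD st.1 iv.1 st.2
      let hi := PySem.List.pyGetD height iv.1 0
      if hi > st.2 then (ma, hi) else (ma, st.2))
    (max_array, 0)).1

-- ===== PORT B =====
def max_from_side_alt (height : List Int) (side : String) : List Int :=
  let n := height.length
  if side == "right" then
    (PySem.List.pyRange 0 n 1).map (fun i =>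
      (PySem.List.max? ((0 : Int) :: PySem.List.slice height (some (i + 1)) none) (fun y => y)).getD 0)
  else
    (PySem.List.pyRange 0 n 1).map (fun i =>
      (PySem.List.max? ((0 : Int) :: PySem.List.slice height none (some i)) (fun y => y)).getD 0)

-- ===== PRECONDITION & SPEC =====
def Spec_max_from_side (height : List Int) (side : String) (out : List Int) : Prop := out = max_from_side_alt height side
instance (height : List Int) (side : String) (out : List Int) : Decidable (Spec_max_from_side height side out) := by unfold Spec_max_from_side; infer_instance

-- ===== CLAIM (what is proved, stated in full; the proofs are below) =====
def Claim_equal_max_from_side : Prop := ∀ (height : List Int) (side : String), Dom_max_from_side height side → Spec_max_from_side height side (max_from_side height side)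

-- ===== LEMMAS AND PROOFS =====

-- the loop body of A, with the value read from the enumerate pair (equal to height[i] there)
def pvG : (List Int × Int) → (Int × Int) → (List Int × Int) :=
  fun st iv =>
    (PySem.List.pySetD st.1 iv.1 st.2, if iv.2 > st.2 then iv.2 else st.2)

theorem pv_foldl_max_hoist (l : List Int) : ∀ (c v : Int),
    l.foldl max (max c v) = max (l.foldl max c) v := by
  induction l with
  | nil => intro c v; rfl
  | cons x t ih =>
    intro c v
    simp only [List.foldl_cons]
    rw [show max (max c v) x = max (max c x) v by
      rw [max_assoc, max_assoc, max_comm v x], ih]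

theorem pv_foldl_max_reverse (l : List Int) : ∀ (c : Int),
    l.reverse.foldl max c = l.foldl max c := by
  induction l with
  | nil => intro c; rfl
  | cons x t ih =>
    intro c
    simp only [List.reverse_cons, List.foldl_append, List.foldl_cons, List.foldl_nil, ih]
    rw [pv_foldl_max_hoist]

theorem pvG_eq (acc : List Int) (c i v : Int) :
    pvG (acc, c) (i, v) = (PySem.List.pySetD acc i c, max c v) := by
  simp only [pvG]
  by_cases h : v > c
  · rw [if_pos h, max_eq_right (le_of_lt h)]
  · rw [if_neg h, max_eq_left (le_of_not_gt h)]

theorem pv_fst_left (t : List Int) : ∀ (s : Nat) (acc : List Int) (c : Int) (j : Nat),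
    j < acc.length →
    ((PySem.List.enumerate t (s : Int)).foldl pvG (acc, c)).1[j]?
      = if s ≤ j ∧ j < s + t.length then some ((t.take (j - s)).foldl max c) else acc[j]? := by
  induction t with
  | nil =>
    intro s acc c j hj
    simp [PySem.List.enumerate_nil]
  | cons v t ih =>
    intro s acc c j hj
    rw [PySem.List.enumerate_cons]
    simp only [List.foldl_cons]
    have hcast : ((s : Int) + 1) = ((s + 1 : Nat) : Int) := by push_cast; ring
    rw [pvG_eq, hcast, PySem.List.pySetD_natCast,
      ih (s + 1) (acc.set s c) (max c v) j (by simpa using hj)]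
    by_cases h1 : s + 1 ≤ j ∧ j < s + 1 + t.length
    · have h2 : s ≤ j ∧ j < s + (v :: t).length := by simp; omega
      rw [if_pos h1, if_pos h2]
      have : j - s = (j - (s + 1)) + 1 := by omega
      rw [this]
      simp [List.take_succ_cons]
    · rw [if_neg h1]
      by_cases h3 : j = s
      · subst h3
        rw [List.getElem?_set, if_pos rfl, if_pos hj,
          if_pos (by simp)]
        simp
      · rw [List.getElem?_set, if_neg (fun h => h3 h.symm)]
        rw [if_neg (by simp; omega)]

theorem pv_snd_right (t : List Int) : ∀ (s : Nat) (acc : List Int) (c : Int),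
    ((PySem.List.enumerate t (s : Int)).reverse.foldl pvG (acc, c)).2
      = t.reverse.foldl max c := by
  induction t with
  | nil => intro s acc c; simp [PySem.List.enumerate_nil]
  | cons v t ih =>
    intro s acc c
    rw [PySem.List.enumerate_cons]
    simp only [List.reverse_cons, List.foldl_append, List.foldl_cons, List.foldl_nil]
    have hcast : ((s : Int) + 1) = ((s + 1 : Nat) : Int) := by push_cast; ring
    rw [hcast]
    have hfold : List.foldl pvG (acc, c) (PySem.List.enumerate t ((s + 1 : Nat) : Int)).reverse
        = (((PySem.List.enumerate t ((s + 1 : Nat) : Int)).reverse.foldl pvG (acc, c)).1,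
           t.reverse.foldl max c) := by
      rw [← ih (s + 1) acc c]
    rw [hfold, pvG_eq]

theorem pv_fold_len (l : List (Int × Int)) : ∀ (acc : List Int) (c : Int),
    (l.foldl pvG (acc, c)).1.length = acc.length := by
  induction l with
  | nil => intro acc c; rfl
  | cons p l ihl =>
    intro acc c
    simp only [List.foldl_cons, pvG]
    rw [ihl]
    simp [PySem.List.length_pySetD]

theorem pv_fst_right (t : List Int) : ∀ (s : Nat) (acc : List Int) (c : Int) (j : Nat),
    j < acc.length →
    ((PySem.List.enumerate t (s : Int)).reverse.foldl pvG (acc, c)).1[j]?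
      = if s ≤ j ∧ j < s + t.length then some ((t.drop (j - s + 1)).foldl max c) else acc[j]? := by
  induction t with
  | nil =>
    intro s acc c j hj
    simp [PySem.List.enumerate_nil]
  | cons v t ih =>
    intro s acc c j hj
    rw [PySem.List.enumerate_cons]
    simp only [List.reverse_cons, List.foldl_append, List.foldl_cons, List.foldl_nil]
    have hcast : ((s : Int) + 1) = ((s + 1 : Nat) : Int) := by push_cast; ring
    rw [hcast]
    have hfold : List.foldl pvG (acc, c) (PySem.List.enumerate t ((s + 1 : Nat) : Int)).reverse
        = (((PySem.List.enumerate t ((s + 1 : Nat) : Int)).reverse.foldl pvG (acc, c)).1,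
           ((PySem.List.enumerate t ((s + 1 : Nat) : Int)).reverse.foldl pvG (acc, c)).2) := rfl
    rw [hfold, pvG_eq, pv_snd_right, PySem.List.pySetD_natCast, List.getElem?_set]
    by_cases h3 : j = s
    · subst h3
      rw [if_pos rfl,
        if_pos (by rw [pv_fold_len]; exact hj),
        if_pos (by simp)]
      have h4 : j - j + 1 = 1 := by omega
      rw [h4]
      rw [pv_foldl_max_reverse]
      rfl
    · rw [if_neg (fun h => h3 h.symm), ih (s + 1) acc c j hj]
      by_cases h1 : s + 1 ≤ j ∧ j < s + 1 + t.length
      · rw [if_pos h1, if_pos (by simp; omega)]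
        have : j - s + 1 = (j - (s + 1) + 1) + 1 := by omega
        rw [this]
        simp [List.drop_succ_cons]
      · rw [if_neg h1, if_neg (by simp; omega)]

-- ===== VERDICT (by name: the statement is the Claim_ definition above) =====
theorem max_from_side_spec : Claim_equal_max_from_side := by
  unfold Claim_equal_max_from_side
  intro height side _
  unfold Spec_max_from_side max_from_side max_from_side_alt
  simp only []
  rw [List.map_const', PySem.List.length_pyRange_one]
  have hlen0 : ((height.length : Int) - 0).toNat = height.length := by omega
  rw [hlen0]
  by_cases hs : side = "right"
  · simp only [hs, beq_self_eq_true, if_true]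
    rw [PySem.List.foldl_congr_mem _ _ pvG _
      (by
        intro acc x hx
        obtain ⟨k, hk, rfl⟩ := (PySem.List.mem_enumerate_iff _ _ _).1 (List.mem_reverse.1 hx)
        have hget : PySem.List.pyGetD height ((0 : Int) + (k : Int)) 0 = height[k] := by
          rw [show ((0 : Int) + (k : Int)) = ((k : Nat) : Int) by ring,
            PySem.List.pyGetD_natCast]
          exact List.getD_eq_getElem _ _ hk
        simp only [hget, pvG]
        split <;> rfl)]
    apply List.ext_getElem?
    intro j
    by_cases hj : j < height.length
    · have hmain := pv_fst_right height 0 (List.replicate height.length 0) 0 j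
        (by simpa using hj)
      simp only [Nat.cast_zero] at hmain
      rw [hmain, if_pos ⟨Nat.zero_le _, by simpa using hj⟩,
        PySem.List.getElem?_map_pyRange_zero _ _ _ hj,
        show ((j : Nat) : Int) + 1 = (((j + 1 : Nat) : Nat) : Int) by push_cast; ring,
        PySem.List.slice_from_natCast, PySem.List.max?_id_cons]
      simp
    · rw [List.getElem?_eq_none (l := ((PySem.List.enumerate height 0).reverse.foldl pvG
          (List.replicate height.length 0, 0)).1)
          (by rw [pv_fold_len]; simp; omega),
        List.getElem?_eq_none (by simp [PySem.List.length_pyRange_one]; omega)]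
  · have hbeq : (side == "right") = false := by
      simp [hs]
    simp only [hbeq, if_false, Bool.false_eq_true]
    rw [PySem.List.foldl_congr_mem _ _ pvG _
      (by
        intro acc x hx
        obtain ⟨k, hk, rfl⟩ := (PySem.List.mem_enumerate_iff _ _ _).1 hx
        have hget : PySem.List.pyGetD height ((0 : Int) + (k : Int)) 0 = height[k] := by
          rw [show ((0 : Int) + (k : Int)) = ((k : Nat) : Int) by ring,
            PySem.List.pyGetD_natCast]
          exact List.getD_eq_getElem _ _ hk
        simp only [hget, pvG]
        split <;> rfl)]
    apply List.ext_getElem?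
    intro j
    by_cases hj : j < height.length
    · have hmain := pv_fst_left height 0 (List.replicate height.length 0) 0 j
        (by simpa using hj)
      simp only [Nat.cast_zero] at hmain
      rw [hmain, if_pos ⟨Nat.zero_le _, by simpa using hj⟩,
        PySem.List.getElem?_map_pyRange_zero _ _ _ hj,
        PySem.List.slice_to_natCast, PySem.List.max?_id_cons]
      simp
    · rw [List.getElem?_eq_none (l := ((PySem.List.enumerate height 0).foldl pvG
          (List.replicate height.length 0, 0)).1)
          (by rw [pv_fold_len]; simp; omega),
        List.getElem?_eq_none (by simp [PySem.List.length_pyRange_one]; omega)]
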